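-- pv_equiv track=rewrite | github.com/sagu2000/largest_rectangleApi | main.py | get_submatrices
-- ===== SOURCE A (Python) =====
-- def get_submatrices(matrix):
--     submatrices = []
--     rows = len(matrix)
--     cols = len(matrix[0])
--
--     for i in range(rows):
--         for j in range(cols):
--             for k in range(i, rows):
--                 for l in range(j, cols):
--                     submatrix = [row[j:l+1] for row in matrix[i:k+1]]
--                     if is_same_values(submatrix):
--                         submatrices.append(submatrix)
--
--     return submatrices
--
-- def is_same_values(submatrix):
--     value = submatrix[0][0]
--     for row in submatrix:
--         for element in row:
--             if element != value:
--                 return False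
--     return True
-- ===== SOURCE B (Python) =====
-- def get_submatrices(matrix):
--     rows = len(matrix)
--     cols = len(matrix[0])
--     grid = [row[:cols] for row in matrix]
--     out = []
--     for i in range(rows):
--         for j in range(cols):
--             v = grid[i][j]
--             m = cols - j          # widest possible uniform width starting at column j
--             block = []            # rows i..k of the grid
--             for k in range(i, rows):
--                 row = grid[k]
--                 if row[j] != v:
--                     break         # no uniform submatrix can extend past this row
--                 # shrink m to the run of v's in this row (capped at the old m)
--                 t = 0
--                 while t < m and j + t < len(row) and row[j + t] == v:
--                     t += 1
--                 m = t
--                 block.append(row)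
--                 for l in range(j, j + m):
--                     out.append([r[j:l + 1] for r in block])
--     return out
-- ===== Notes on version B (the rewrite author's own statement) =====
-- stated objective: faster
-- what changed: Instead of materialising and scanning every submatrix (quadruple loop + full uniformity rescan), B precomputes per top-left corner the maximal uniform width, shrinking it row by row via the run of equal values and breaking at the first column mismatch, so it emits exactly the uniform submatrices without ever testing a non-uniform one.
import Mathlib
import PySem

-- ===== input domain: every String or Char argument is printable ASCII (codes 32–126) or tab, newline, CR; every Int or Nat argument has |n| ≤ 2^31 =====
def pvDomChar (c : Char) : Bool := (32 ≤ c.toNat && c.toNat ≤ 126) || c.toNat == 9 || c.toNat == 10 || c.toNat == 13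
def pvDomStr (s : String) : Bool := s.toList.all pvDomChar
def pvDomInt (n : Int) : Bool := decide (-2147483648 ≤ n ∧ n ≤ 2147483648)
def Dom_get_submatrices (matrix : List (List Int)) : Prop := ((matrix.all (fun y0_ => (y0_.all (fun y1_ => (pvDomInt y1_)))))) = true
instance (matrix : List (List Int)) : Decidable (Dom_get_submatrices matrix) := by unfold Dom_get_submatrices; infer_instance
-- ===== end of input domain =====

-- B enumerates only the uniform submatrices (per top-left corner it shrinks the maximal
-- uniform width row by row and breaks at the first column mismatch) instead of testing
-- every submatrix; equal output (same order) on Pre_.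

-- ===== PORT A =====
def is_same_values (submatrix : List (List Int)) : Bool :=
  let value := (submatrix.headD []).headD 0
  submatrix.all (fun row => row.all (fun element => element == value))
def get_submatrices (matrix : List (List Int)) : List (List (List Int)) :=
  let rows := matrix.length
  let cols := (matrix.headD []).length
  (List.range rows).foldl (fun acc (i : Nat) =>
    (List.range cols).foldl (fun acc (j : Nat) =>
      (List.range' i (rows - i)).foldl (fun acc (k : Nat) =>
        (List.range' j (cols - j)).foldl (fun acc (l : Nat) =>
          let submatrix := (PySem.List.slice matrix (some (i:Int)) (some ((k:Int)+1))).map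
            (fun row => PySem.List.slice row (some (j:Int)) (some ((l:Int)+1)))
          if is_same_values submatrix then acc ++ [submatrix] else acc) acc) acc) acc) []

-- ===== PORT B =====
-- the while loop of Source B: count of leading entries equal to v in row[j:], capped at m
def runlen (row : List Int) (j m : Nat) (v : Int) : Nat :=
  (((row.drop j).take m).takeWhile (fun e => e == v)).length
def bLoopK (j : Nat) (v : Int) : List (List Int) → Nat → List (List Int) → List (List (List Int)) → List (List (List Int))
  | [], _, _, out => out
  | row :: rest, m, block, out =>
    if row.getD j 0 != v then out
    else
      let t := runlen row j m v
      let block' := block ++ [row]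
      let out' := (List.range' j t).foldl
        (fun a (l : Nat) => a ++ [block'.map (fun r => PySem.List.slice r (some (j:Int)) (some ((l:Int)+1)))]) out
      bLoopK j v rest t block' out'
def get_submatrices_alt (matrix : List (List Int)) : List (List (List Int)) :=
  let rows := matrix.length
  let cols := (matrix.headD []).length
  let grid := matrix.map (fun row => row.take cols)
  (List.range rows).foldl (fun out (i : Nat) =>
    (List.range cols).foldl (fun out (j : Nat) =>
      bLoopK j ((grid.getD i []).getD j 0) (grid.drop i) (cols - j) [] out) out) []

-- ===== PRECONDITION & SPEC =====
-- A raises IndexError exactly on the empty matrix and on matrices with a row shorter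
-- than the first row (len(matrix[0])); Pre_ excludes exactly those inputs.
def Pre_get_submatrices (matrix : List (List Int)) : Prop :=
  matrix ≠ [] ∧ ∀ row ∈ matrix, (matrix.headD []).length ≤ row.length
instance (matrix : List (List Int)) : Decidable (Pre_get_submatrices matrix) := by
  unfold Pre_get_submatrices; infer_instance

def pvWitness_get_submatrices : List (List Int) := [[1, 1], [1, 2]]

def Spec_get_submatrices (matrix : List (List Int)) (out : List (List (List Int))) : Prop := out = get_submatrices_alt matrix
instance (matrix : List (List Int)) (out : List (List (List Int))) : Decidable (Spec_get_submatrices matrix out) := by unfold Spec_get_submatrices; infer_instance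

-- ===== CLAIM (what is proved, stated in full; the proofs are below) =====
def Claim_equal_get_submatrices : Prop := ∀ (matrix : List (List Int)), Dom_get_submatrices matrix → Pre_get_submatrices matrix → Spec_get_submatrices matrix (get_submatrices matrix)

-- ===== LEMMAS AND PROOFS =====

-- entry (r, co) of the matrix
def matAt (matrix : List (List Int)) (r co : Nat) : Int := (matrix.getD r []).getD co 0

-- A's submatrix for corner (i,j)-(k,l)
def Asub (matrix : List (List Int)) (i j k l : Nat) : List (List Int) :=
  (PySem.List.slice matrix (some (i:Int)) (some ((k:Int)+1))).map
    (fun row => PySem.List.slice row (some (j:Int)) (some ((l:Int)+1)))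


-- foldl identity
lemma pv_foldl_keep {α β : Type} (l : List α) (acc : β) : l.foldl (fun a _ => a) acc = acc := by
  induction l generalizing acc with
  | nil => rfl
  | cons x xs ih => simpa using ih acc

-- all over drop/take window via getD
lemma pv_all_drop_take {α : Type} (d : α) (p : α → Bool) (xs : List α) (a b : Nat)
    (hb : b ≤ xs.length) :
    (((xs.drop a).take (b - a)).all p = true) ↔ ∀ t, a ≤ t → t < b → p (xs.getD t d) = true := by
  rw [List.all_eq_true]
  constructor
  · intro h t hat htb
    have ht : t < xs.length := lt_of_lt_of_le htb hb
    have hmem : xs.getD t d ∈ (xs.drop a).take (b - a) := by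
      have hlen : t - a < ((xs.drop a).take (b - a)).length := by
        simp [List.length_take, List.length_drop]; omega
      have : ((xs.drop a).take (b - a))[t - a]'hlen = xs[t] := by
        rw [List.getElem_take, List.getElem_drop]
        congr 1; omega
      rw [List.getD_eq_getElem xs d ht, ← this]
      exact List.getElem_mem hlen
    exact h _ hmem
  · intro h x hx
    obtain ⟨s, hs, rfl⟩ := List.mem_iff_getElem.mp hx
    have hs' : s < b - a ∧ s < xs.length - a := by
      simp [List.length_take, List.length_drop] at hs; omega
    have hlt : a + s < xs.length := by omega
    have : ((xs.drop a).take (b - a))[s]'hs = xs[a + s] := by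
      rw [List.getElem_take, List.getElem_drop]
    rw [this, ← List.getD_eq_getElem xs d hlt]
    exact h _ (by omega) (by omega)

-- takeWhile length characterization
lemma pv_lt_takeWhile_length {α : Type} (d : α) (p : α → Bool) :
    ∀ (ys : List α) (s : Nat),
      (s < (ys.takeWhile p).length ↔ s < ys.length ∧ ∀ s', s' ≤ s → p (ys.getD s' d) = true) := by
  intro ys
  induction ys with
  | nil => intro s; simp
  | cons y ys ih =>
    intro s
    by_cases hy : p y = true
    · rw [List.takeWhile_cons_of_pos hy]
      cases s with
      | zero =>
        simp only [List.length_cons]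
        constructor
        · intro _; exact ⟨by omega, by intro s' hs'; interval_cases s' <;> simpa using hy⟩
        · intro _; omega
      | succ s =>
        simp only [List.length_cons, Nat.succ_lt_succ_iff]
        rw [ih s]
        constructor
        · rintro ⟨h1, h2⟩
          refine ⟨by omega, ?_⟩
          intro s' hs'
          cases s' with
          | zero => simpa using hy
          | succ s' => simpa using h2 s' (by omega)
        · rintro ⟨h1, h2⟩
          refine ⟨by omega, ?_⟩
          intro s' hs'
          simpa using h2 (s' + 1) (by omega)
    · rw [List.takeWhile_cons_of_neg hy]
      simp only [List.length_nil]
      constructor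
      · omega
      · rintro ⟨h1, h2⟩
        exact absurd (by simpa using h2 0 (by omega)) hy

-- getD inside drop/take
lemma pv_getD_drop_take {α : Type} (d : α) (xs : List α) (a m t : Nat)
    (h1 : t < m) (h2 : a + t < xs.length) :
    ((xs.drop a).take m).getD t d = xs.getD (a + t) d := by
  have hlen : t < ((xs.drop a).take m).length := by
    simp [List.length_take, List.length_drop]; omega
  rw [List.getD_eq_getElem _ d hlen, List.getD_eq_getElem xs d h2]
  rw [List.getElem_take, List.getElem_drop]

lemma pv_runlen_lt_iff (row : List Int) (j m : Nat) (v : Int) (s : Nat) :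
    s < runlen row j m v ↔
      s < m ∧ j + s < row.length ∧ ∀ s', s' ≤ s → row.getD (j + s') 0 = v := by
  unfold runlen
  rw [pv_lt_takeWhile_length 0]
  have hlen : ((row.drop j).take m).length = min m (row.length - j) := by
    simp [List.length_take, List.length_drop]
  constructor
  · rintro ⟨h1, h2⟩
    rw [hlen] at h1
    refine ⟨by omega, by omega, ?_⟩
    intro s' hs'
    have := h2 s' hs'
    rw [pv_getD_drop_take 0 row j m s' (by omega) (by omega)] at this
    simpa using this
  · rintro ⟨h1, h2, h3⟩
    refine ⟨by rw [hlen]; omega, ?_⟩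
    intro s' hs'
    rw [pv_getD_drop_take 0 row j m s' (by omega) (by omega)]
    simpa using h3 s' hs'

-- uniformity characterization
lemma pv_uniform_iff (matrix : List (List Int))
    (hlen : ∀ row ∈ matrix, (matrix.headD []).length ≤ row.length)
    (i j k l : Nat) (hik : i ≤ k) (hk : k < matrix.length)
    (hjl : j ≤ l) (hl : l < (matrix.headD []).length) :
    (is_same_values (Asub matrix i j k l) = true ↔
      ∀ r, i ≤ r → r ≤ k → ∀ co, j ≤ co → co ≤ l → matAt matrix r co = matAt matrix i j) := by
  have hc := (matrix.headD []).length
  set c := (matrix.headD []).length with hcdef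
  have hrowlen : ∀ r, r < matrix.length → c ≤ (matrix.getD r []).length := by
    intro r hr
    have : matrix.getD r [] ∈ matrix := by
      rw [List.getD_eq_getElem _ [] hr]; exact List.getElem_mem hr
    exact hlen _ this
  have hi : i < matrix.length := lt_of_le_of_lt hik hk
  -- rewrite the slices
  have hAsub : Asub matrix i j k l =
      ((matrix.drop i).take (k + 1 - i)).map (fun row => (row.drop j).take (l + 1 - j)) := by
    unfold Asub
    have h1 : ((k:Int) + 1) = ((k+1 : Nat) : Int) := by push_cast; ring
    have h2 : ((l:Int) + 1) = ((l+1 : Nat) : Int) := by push_cast; ring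
    rw [h1]
    rw [PySem.List.slice_natCast]
    congr 1
    funext row
    rw [h2, PySem.List.slice_natCast]
  rw [hAsub]
  -- the head value
  have hdropi : matrix.drop i = (matrix[i]'hi) :: matrix.drop (i+1) := List.drop_eq_getElem_cons hi
  have hrow0len : j < (matrix[i]'hi).length := by
    have := hrowlen i hi
    rw [List.getD_eq_getElem _ [] hi] at this
    omega
  have hrow0 : (matrix[i]'hi).drop j = ((matrix[i]'hi)[j]'hrow0len) :: (matrix[i]'hi).drop (j+1) :=
    List.drop_eq_getElem_cons hrow0len
  have hvalue : ((((matrix.drop i).take (k + 1 - i)).map (fun row => (row.drop j).take (l + 1 - j))).headD []).headD 0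
      = matAt matrix i j := by
    rw [hdropi]
    have h1 : k + 1 - i = (k - i) + 1 := by omega
    rw [h1, List.take_succ_cons, List.map_cons, List.headD_cons]
    rw [hrow0]
    have h2 : l + 1 - j = (l - j) + 1 := by omega
    rw [h2, List.take_succ_cons, List.headD_cons]
    unfold matAt
    rw [List.getD_eq_getElem _ [] hi, List.getD_eq_getElem _ 0 hrow0len]
  -- now the all-part
  unfold is_same_values
  simp only [hvalue]
  have hk1 : k + 1 ≤ matrix.length := by omega
  rw [List.all_map]
  rw [pv_all_drop_take [] _ matrix i (k+1) hk1]
  constructor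
  · intro h r hir hrk co hjco hcol
    have hr : r < matrix.length := by omega
    have h2 := h r hir (by omega)
    simp only [Function.comp] at h2
    rw [pv_all_drop_take 0 _ (matrix.getD r []) j (l+1) (by have := hrowlen r hr; omega)] at h2
    have := h2 co hjco (by omega)
    unfold matAt
    simpa using this
  · intro h t hit htk
    have ht : t < matrix.length := by omega
    simp only [Function.comp]
    rw [pv_all_drop_take 0 _ (matrix.getD t []) j (l+1) (by have := hrowlen t ht; omega)]
    intro co hjco hcol
    have := h t hit (by omega) co hjco (by omega)
    unfold matAt at this
    simpa using this

-- slicing a truncated row is slicing the row, for l+1 ≤ c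
lemma pv_slice_take (row : List Int) (c j l : Nat) (h : l + 1 ≤ c) :
    PySem.List.slice (row.take c) (some (j:Int)) (some ((l:Int)+1)) =
    PySem.List.slice row (some (j:Int)) (some ((l:Int)+1)) := by
  have h2 : ((l:Int) + 1) = ((l+1 : Nat) : Int) := by push_cast; ring
  rw [h2, PySem.List.slice_natCast, PySem.List.slice_natCast]
  rw [List.drop_take, List.take_take]
  congr 1
  omega

-- THE MAIN INDUCTION
lemma pv_main_kl (matrix : List (List Int))
    (hlen : ∀ row ∈ matrix, (matrix.headD []).length ≤ row.length)
    (i j : Nat) (hi : i < matrix.length) (hj : j < (matrix.headD []).length) :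
    ∀ (L : List (List Int)) (k0 m : Nat) (block : List (List Int)) (acc : List (List (List Int))),
      i ≤ k0 →
      L = (matrix.map (fun row => row.take (matrix.headD []).length)).drop k0 →
      block = ((matrix.map (fun row => row.take (matrix.headD []).length)).take k0).drop i →
      (∀ s : Nat, s < m ↔ (j + s < (matrix.headD []).length ∧
        ∀ r, i ≤ r → r < k0 → ∀ s', s' ≤ s → matAt matrix r (j+s') = matAt matrix i j)) →
      (List.range' k0 (matrix.length - k0)).foldl (fun acc k =>
        (List.range' j ((matrix.headD []).length - j)).foldl (fun acc l =>
          if is_same_values (Asub matrix i j k l) then acc ++ [Asub matrix i j k l] else acc) acc) acc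
      = bLoopK j (matAt matrix i j) L m block acc := by
  set c := (matrix.headD []).length with hcdef
  set g := matrix.map (fun row => row.take c) with hgdef
  have hglen : g.length = matrix.length := by simp [hgdef]
  have hrowlen : ∀ r, r < matrix.length → c ≤ (matrix.getD r []).length := by
    intro r hr
    have : matrix.getD r [] ∈ matrix := by
      rw [List.getD_eq_getElem _ [] hr]; exact List.getElem_mem hr
    exact hlen _ this
  intro L
  induction L with
  | nil =>
    intro k0 m block acc hik0 hL hblock hm
    have hk0 : matrix.length ≤ k0 := by
      have := congrArg List.length hL
      simp [hglen] at this
      omega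
    have : matrix.length - k0 = 0 := by omega
    rw [this]
    simp [bLoopK]
  | cons row rest ih =>
    intro k0 m block acc hik0 hL hblock hm
    -- k0 < n, row = g[k0], rest = g.drop (k0+1)
    have hk0 : k0 < matrix.length := by
      by_contra hcon
      have : g.drop k0 = [] := List.drop_eq_nil_of_le (by omega)
      rw [← hL] at this
      simp at this
    have hgk0 : g.drop k0 = (g[k0]'(by omega)) :: g.drop (k0+1) := List.drop_eq_getElem_cons (by omega)
    rw [hgk0] at hL
    obtain ⟨hrow, hrest⟩ : row = (g[k0]'(by omega)) ∧ rest = g.drop (k0+1) := by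
      have h1 := List.head_eq_of_cons_eq hL
      have h2 := List.tail_eq_of_cons_eq hL
      exact ⟨h1, h2⟩
    have hrowval : row = (matrix[k0]'hk0).take c := by
      rw [hrow]; simp [hgdef]
    have hrowlen' : row.length = c := by
      rw [hrowval]
      have := hrowlen k0 hk0
      rw [List.getD_eq_getElem _ [] hk0] at this
      simp; omega
    have hrowgetD : ∀ s, j + s < c → row.getD (j+s) 0 = matAt matrix k0 (j+s) := by
      intro s hs
      rw [hrowval]
      unfold matAt
      rw [List.getD_eq_getElem _ [] hk0]
      have hlt : j + s < (matrix[k0]'hk0).length := by have := hrowlen k0 hk0; rw [List.getD_eq_getElem _ [] hk0] at this; omega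
      rw [List.getD_eq_getElem _ 0 (by simp; omega), List.getD_eq_getElem _ 0 hlt]
      simp [List.getElem_take]
    -- unroll range' on the A side
    have hrange : List.range' k0 (matrix.length - k0) = k0 :: List.range' (k0+1) (matrix.length - (k0+1)) := by
      have : matrix.length - k0 = (matrix.length - (k0+1)) + 1 := by omega
      rw [this, List.range'_succ]
    rw [hrange, List.foldl_cons]
    by_cases hv : matAt matrix k0 j = matAt matrix i j
    · -- continue
      have hguard : (row.getD j 0 != matAt matrix i j) = false := by
        have h0 := hrowgetD 0 (by omega)
        simp only [Nat.add_zero] at h0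
        rw [h0, hv]
        simp
      rw [bLoopK]
      rw [hguard]
      simp only [Bool.false_eq_true, if_false]
      set t := runlen row j m (matAt matrix i j) with htdef
      -- new invariant
      have hm' : ∀ s : Nat, s < t ↔ (j + s < c ∧
          ∀ r, i ≤ r → r < k0+1 → ∀ s', s' ≤ s → matAt matrix r (j+s') = matAt matrix i j) := by
        intro s
        rw [htdef, pv_runlen_lt_iff]
        constructor
        · rintro ⟨h1, h2, h3⟩
          have hjs : j + s < c := by omega
          refine ⟨hjs, ?_⟩
          intro r hir hrk1 s' hs'
          rcases Nat.lt_or_ge r k0 with hr | hr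
          · exact ((hm s).mp h1).2 r hir hr s' hs'
          · have : r = k0 := by omega
            subst this
            rw [← hrowgetD s' (by omega)]
            exact h3 s' hs'
        · rintro ⟨h1, h2⟩
          refine ⟨?_, by omega, ?_⟩
          · rw [hm s]
            exact ⟨h1, fun r hir hrk s' hs' => h2 r hir (by omega) s' hs'⟩
          · intro s' hs'
            rw [hrowgetD s' (by omega)]
            exact h2 k0 hik0 (by omega) s' hs'
      have htle : t ≤ c - j := by
        by_contra hcon
        have h1 := (hm' (c - j)).mp (by omega)
        omega
      -- block'
      have hblock' : block ++ [row] = (g.take (k0+1)).drop i := by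
        rw [hblock, hrow]
        rw [List.take_add_one]
        have : (g[k0]?).toList = [g[k0]'(by omega)] := by
          rw [List.getElem?_eq_getElem (by omega)]; rfl
        rw [this]
        rw [List.drop_append_of_le_length (by simp [hglen]; omega)]
      -- the k0-step of A equals the emit fold of B
      have hstep : (List.range' j (c - j)).foldl (fun acc l =>
            if is_same_values (Asub matrix i j k0 l) then acc ++ [Asub matrix i j k0 l] else acc) acc
          = (List.range' j t).foldl
            (fun a (l : Nat) => a ++ [(block ++ [row]).map (fun r => PySem.List.slice r (some (j:Int)) (some ((l:Int)+1)))]) acc := by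
        rw [PySem.List.foldl_append_if, PySem.List.foldl_append_singleton_eq_map]
        congr 1
        have hfilter : (List.range' j (c - j)).filter (fun l => is_same_values (Asub matrix i j k0 l))
            = List.range' j t := by
          have hsplit : List.range' j (c - j) = List.range' j t ++ List.range' (j+t) (c - j - t) := by
            have h1 : c - j = t + (c - j - t) := by omega
            rw [h1, ← List.range'_append_1]
            simp
          rw [hsplit, List.filter_append]
          have hU : ∀ l, j ≤ l → l < c → (is_same_values (Asub matrix i j k0 l) = true ↔ l - j < t) := by
            intro l hjlle hlc
            rw [pv_uniform_iff matrix hlen i j k0 l hik0 hk0 hjlle hlc]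
            rw [hm' (l - j)]
            constructor
            · intro h
              refine ⟨by omega, ?_⟩
              intro r hir hrk1 s' hs'
              exact h r hir (by omega) (j+s') (by omega) (by omega)
            · rintro ⟨h1, h2⟩ r hir hrk co hjco hcol
              have := h2 r hir (by omega) (co - j) (by omega)
              rw [Nat.add_sub_cancel' hjco] at this
              exact this
          have h1 : (List.range' j t).filter (fun l => is_same_values (Asub matrix i j k0 l)) = List.range' j t := by
            rw [List.filter_eq_self]
            intro l hl
            rw [List.mem_range'_1] at hl
            exact (hU l hl.1 (by omega)).mpr (by omega)
          have h2 : (List.range' (j+t) (c - j - t)).filter (fun l => is_same_values (Asub matrix i j k0 l)) = [] := by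
            rw [List.filter_eq_nil_iff]
            intro l hl
            rw [List.mem_range'_1] at hl
            simp only [Bool.not_eq_true]
            rw [← Bool.not_eq_true]
            intro hcon
            have := (hU l (by omega) (by omega)).mp hcon
            omega
          rw [h1, h2, List.append_nil]
        rw [hfilter]
        apply List.map_congr_left
        intro l hl
        rw [List.mem_range'_1] at hl
        -- Asub = block'.map slice
        have hl1c : l + 1 ≤ c := by omega
        unfold Asub
        have hA : PySem.List.slice matrix (some (i:Int)) (some ((k0:Int)+1)) = (matrix.take (k0+1)).drop i := by
          have h1 : ((k0:Int) + 1) = ((k0+1 : Nat) : Int) := by push_cast; ring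
          rw [h1, PySem.List.slice_natCast, List.drop_take]
        rw [hA, hblock']
        rw [hgdef, ← List.map_take, ← List.map_drop, List.map_map]
        apply List.map_congr_left
        intro r hr
        simp only [Function.comp]
        exact (pv_slice_take r c j l hl1c).symm
      rw [hstep, hblock']
      exact ih (k0+1) t _ _ (by omega) (by rw [hrest]) rfl hm'
    · -- break: guard fires on B side, A side appends nothing any more
      have hguard : (row.getD j 0 != matAt matrix i j) = true := by
        have h0 := hrowgetD 0 (by omega)
        simp only [Nat.add_zero] at h0
        rw [h0]
        simpa using hv
      rw [bLoopK, hguard]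
      simp only [if_true]
      -- every remaining A step is the identity
      have hid : ∀ (acc' : List (List (List Int))) (k : Nat), k0 ≤ k → k < matrix.length →
          (List.range' j (c - j)).foldl (fun acc l =>
            if is_same_values (Asub matrix i j k l) then acc ++ [Asub matrix i j k l] else acc) acc' = acc' := by
        intro acc' k hk1 hk2
        have hkmem : k0 ≤ k ∧ k < matrix.length := ⟨hk1, hk2⟩
        have hinner : ∀ (a : List (List (List Int))), ∀ l ∈ List.range' j (c - j),
            (if is_same_values (Asub matrix i j k l) then a ++ [Asub matrix i j k l] else a) = a := by
          intro a l hlmem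
          rw [List.mem_range'_1] at hlmem
          have hfalse : ¬ (is_same_values (Asub matrix i j k l) = true) := by
            rw [pv_uniform_iff matrix hlen i j k l (by omega) (by omega) (by omega) (by omega)]
            intro hcon
            exact hv (hcon k0 hik0 (by omega) j (by omega) (by omega))
          simp [hfalse]
        rw [PySem.List.foldl_congr_mem _ _ (fun a _ => a) acc' (by intro a x hx; exact hinner a x hx)]
        exact pv_foldl_keep _ _
      rw [hid acc k0 le_rfl hk0]
      rw [PySem.List.foldl_congr_mem _ _ (fun a _ => a) acc ?_]
      · exact pv_foldl_keep _ _
      · intro a x hx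
        rw [List.mem_range'_1] at hx
        exact hid a x (by omega) (by omega)

theorem pv_top (matrix : List (List Int))
    (hlen : ∀ row ∈ matrix, (matrix.headD []).length ≤ row.length) :
    get_submatrices matrix = get_submatrices_alt matrix := by
  set c := (matrix.headD []).length with hcdef
  set g := matrix.map (fun row => row.take c) with hgdef
  have hA : get_submatrices matrix = (List.range matrix.length).foldl (fun acc (i : Nat) =>
      (List.range c).foldl (fun acc (j : Nat) =>
        (List.range' i (matrix.length - i)).foldl (fun acc (k : Nat) =>
          (List.range' j (c - j)).foldl (fun acc (l : Nat) =>
            if is_same_values (Asub matrix i j k l) then acc ++ [Asub matrix i j k l] else acc) acc) acc) acc) [] := rfl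
  have hB : get_submatrices_alt matrix = (List.range matrix.length).foldl (fun out (i : Nat) =>
      (List.range c).foldl (fun out (j : Nat) =>
        bLoopK j ((g.getD i []).getD j 0) (g.drop i) (c - j) [] out) out) [] := rfl
  rw [hA, hB]
  apply PySem.List.foldl_congr_mem
  intro acc i hi
  rw [List.mem_range] at hi
  apply PySem.List.foldl_congr_mem
  intro acc' j hj
  rw [List.mem_range] at hj
  have hv : (g.getD i []).getD j 0 = matAt matrix i j := by
    unfold matAt
    have hg : g.getD i [] = (matrix.getD i []).take c := by
      rw [List.getD_eq_getElem _ [] (by simpa [hgdef] using hi), List.getD_eq_getElem _ [] hi]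
      simp [hgdef]
    rw [hg]
    have hrl : c ≤ (matrix.getD i []).length := by
      have : matrix.getD i [] ∈ matrix := by
        rw [List.getD_eq_getElem _ [] hi]; exact List.getElem_mem hi
      exact hlen _ this
    rw [List.getD_eq_getElem _ 0 (by rw [List.length_take]; omega), List.getD_eq_getElem _ 0 (by omega)]
    simp [List.getElem_take]
  rw [hv]
  exact (pv_main_kl matrix hlen i j hi hj (g.drop i) i (c - j) [] acc' le_rfl rfl
    (by rw [List.drop_eq_nil_of_le (by simp)])
    (by
      intro s
      constructor
      · intro hs; exact ⟨by omega, fun r h1 h2 => absurd h2 (by omega)⟩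
      · rintro ⟨h, _⟩; omega)).symm.symm

-- ===== VERDICT (by name: the statement is the Claim_ definition above) =====
theorem get_submatrices_spec : Claim_equal_get_submatrices := by
  intro matrix hDom hPre
  unfold Spec_get_submatrices
  exact pv_top matrix hPre.2
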